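-- pv_equiv track=rewrite | github.com/swuyyuru24/GoEmotions-using-BERT-and-ANN | req_library_loading.py | return_values
-- ===== SOURCE A (Python) =====
-- def return_values(emotion_list):
--     anger=0
--     disgust=0
--     fear=0
--     joy=0
--     sadness=0
--     surprise=0
--     neutral=0
--
--     for i in emotion_list:
--         if i=='anger':
--             anger=1
--         elif i=='disgust':
--             disgust=1
--         elif i=='fear':
--             fear=1
--         elif i=='joy':
--             joy=1
--         elif i=='sadness':
--             sadness=1
--         elif i=='surprise':
--             surprise=1
--         elif i=='neutral':
--             neutral=1
--     return [anger, disgust, fear, joy, sadness, surprise, neutral]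
-- ===== SOURCE B (Python) =====
-- LABELS = ['anger', 'disgust', 'fear', 'joy', 'sadness', 'surprise', 'neutral']
--
-- def return_values(emotion_list):
--     return [1 if lbl in emotion_list else 0 for lbl in LABELS]
-- ===== Notes on version B (the rewrite author's own statement) =====
-- stated objective: idiomatic
-- what changed: B iterates over the fixed 7-label list and tests each label for membership in the input, instead of A's single pass over the input with a 7-way cascading branch updating seven flag variables.
import Mathlib
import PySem

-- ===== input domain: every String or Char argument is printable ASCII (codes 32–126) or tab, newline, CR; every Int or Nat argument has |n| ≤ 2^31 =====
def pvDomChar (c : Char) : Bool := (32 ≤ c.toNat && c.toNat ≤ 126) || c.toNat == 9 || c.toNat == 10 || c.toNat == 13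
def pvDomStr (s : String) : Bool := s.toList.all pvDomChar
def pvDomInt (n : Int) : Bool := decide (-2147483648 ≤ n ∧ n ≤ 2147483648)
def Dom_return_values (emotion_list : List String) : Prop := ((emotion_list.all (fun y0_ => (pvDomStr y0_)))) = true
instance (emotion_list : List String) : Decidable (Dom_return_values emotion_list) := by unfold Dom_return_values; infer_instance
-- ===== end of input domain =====

-- B iterates over the fixed 7-label list testing membership in the input, instead of A's
-- single input pass with a cascading branch over seven flag variables (objective: idiomatic).

-- ===== PORT A =====
-- loop body of A: update the seven flags on one element
def rvStepA (st : Int × Int × Int × Int × Int × Int × Int) (i : String) :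
    Int × Int × Int × Int × Int × Int × Int :=
  if i = "anger" then (1, st.2)
  else if i = "disgust" then (st.1, 1, st.2.2)
  else if i = "fear" then (st.1, st.2.1, 1, st.2.2.2)
  else if i = "joy" then (st.1, st.2.1, st.2.2.1, 1, st.2.2.2.2)
  else if i = "sadness" then (st.1, st.2.1, st.2.2.1, st.2.2.2.1, 1, st.2.2.2.2.2)
  else if i = "surprise" then (st.1, st.2.1, st.2.2.1, st.2.2.2.1, st.2.2.2.2.1, 1, st.2.2.2.2.2.2)
  else if i = "neutral" then (st.1, st.2.1, st.2.2.1, st.2.2.2.1, st.2.2.2.2.1, st.2.2.2.2.2.1, 1)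
  else st

def return_values (emotion_list : List String) : List Int :=
  let st := emotion_list.foldl rvStepA (0, 0, 0, 0, 0, 0, 0)
  [st.1, st.2.1, st.2.2.1, st.2.2.2.1, st.2.2.2.2.1, st.2.2.2.2.2.1, st.2.2.2.2.2.2]

-- ===== PORT B =====
def rvLabels : List String := ["anger", "disgust", "fear", "joy", "sadness", "surprise", "neutral"]

def return_values_alt (emotion_list : List String) : List Int :=
  rvLabels.map (fun lbl => if emotion_list.contains lbl then 1 else 0)

-- ===== PRECONDITION & SPEC =====
def Spec_return_values (emotion_list : List String) (out : List Int) : Prop := out = return_values_alt emotion_list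
instance (emotion_list : List String) (out : List Int) : Decidable (Spec_return_values emotion_list out) := by unfold Spec_return_values; infer_instance

-- ===== CLAIM (what is proved, stated in full; the proofs are below) =====
def Claim_equal_return_values : Prop := ∀ (emotion_list : List String), Dom_return_values emotion_list → Spec_return_values emotion_list (return_values emotion_list)

-- ===== LEMMAS AND PROOFS =====

-- each final flag is 1 if its label occurs in the remaining input, else the incoming flag
def rvFlag (l : List String) (s : String) (x : Int) : Int := if l.contains s then 1 else x

lemma rvFoldA (l : List String) (st : Int × Int × Int × Int × Int × Int × Int) :
    l.foldl rvStepA st =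
      (rvFlag l "anger" st.1, rvFlag l "disgust" st.2.1, rvFlag l "fear" st.2.2.1,
       rvFlag l "joy" st.2.2.2.1, rvFlag l "sadness" st.2.2.2.2.1,
       rvFlag l "surprise" st.2.2.2.2.2.1, rvFlag l "neutral" st.2.2.2.2.2.2) := by
  induction l generalizing st with
  | nil => simp [rvFlag]
  | cons h t ih =>
    rw [List.foldl_cons]
    simp only [rvStepA]
    split_ifs with h1 h2 h3 h4 h5 h6 h7 <;>
      rw [ih] <;>
      first
        | (subst_vars; simp [rvFlag]; done)
        | simp [rvFlag, Ne.symm h1, Ne.symm h2, Ne.symm h3, Ne.symm h4, Ne.symm h5, Ne.symm h6, Ne.symm h7]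

-- ===== VERDICT (by name: the statement is the Claim_ definition above) =====
theorem return_values_spec : Claim_equal_return_values := by
  intro l _
  show _ = _
  simp [return_values, return_values_alt, rvFoldA, rvLabels, rvFlag]
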